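-- pv_equiv track=rewrite | github.com/Boostcamp-Recsys9/codingtest-practice | week3/원삼/신고결과받기_프로그래머스.py | solution
-- ===== SOURCE A (Python) =====
-- def solution(id_list, report, k):
--     # 신고당한 수를 저장하는 dict과 이메일 보낼 수를 저장하는 dict생성
--     report_dict = {i:0 for i in id_list}
--     email_dict = {i:0 for i in id_list}
--     # set으로 중복제거 ~
--     report = set(report)
--     # 신고당했으면 dict에 count
--     for i in report:
--         report_dict[i.split()[1]] += 1
--     # 원래는 이중for문 돌리려고 했으나 시간초과가 (당연히)나서 for문을 쪼개기
--     # k번 이상 신고 당하지 않은 것들에 대해 삭제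
--     for x,y in list(report_dict.items()):
--         if y < k:
--             del report_dict[x]
--     # 정지 대상자들을 신고한 사람들을 이메일 전송 dict에 count
--     for s in report:
--         if s.split()[1] in report_dict.keys():
--             email_dict[s.split()[0]] += 1
--
--     return list(email_dict.values())
-- ===== SOURCE B (Python) =====
-- def solution(id_list, report, k):
--     # Group distinct report strings by the reported id, then tally emails per banned group.
--     reporters = {i: [] for i in id_list}
--     for entry in set(report):
--         t = entry.split()
--         reporters[t[1]].append(t[0])
--     emails = {i: 0 for i in id_list}
--     for rs in reporters.values():
--         if len(rs) >= k:
--             for who in rs: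
--                 emails[who] += 1
--     return list(emails.values())
-- ===== Notes on version B (the rewrite author's own statement) =====
-- stated objective: simpler
-- what changed: Replaces A's three flat passes (count per reported id, a deletion pass pruning the tally dict below k, then a second scan of the report set testing membership in the pruned keys) by one grouping pass that indexes each reported id to the reporters of its distinct report strings, followed by a single walk of that index tallying emails for groups of size >= k.
import Mathlib
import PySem

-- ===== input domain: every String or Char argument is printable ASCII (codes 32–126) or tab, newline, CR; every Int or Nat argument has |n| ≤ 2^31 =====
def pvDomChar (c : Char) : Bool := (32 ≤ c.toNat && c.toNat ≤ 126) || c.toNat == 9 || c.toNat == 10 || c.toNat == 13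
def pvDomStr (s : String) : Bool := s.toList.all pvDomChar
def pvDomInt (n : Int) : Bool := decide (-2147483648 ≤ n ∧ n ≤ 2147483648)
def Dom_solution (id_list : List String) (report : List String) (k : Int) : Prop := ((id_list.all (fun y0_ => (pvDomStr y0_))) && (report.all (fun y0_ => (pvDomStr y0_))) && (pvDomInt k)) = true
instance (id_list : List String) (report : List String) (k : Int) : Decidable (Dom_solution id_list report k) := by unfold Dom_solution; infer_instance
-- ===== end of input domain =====

-- B replaces A's three flat passes (tally, prune below k, rescan with key-membership test)
-- by one grouping pass (reported id -> reporters of its distinct report strings) plus one walk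
-- of that index; objective: simpler.

-- ===== PORT A =====
def solution (id_list : List String) (report : List String) (k : Int) : List Int :=
  -- report_dict = {i:0 for i in id_list}; email_dict = {i:0 for i in id_list}
  let report_dict : PySem.Dict String Int := id_list.foldl (fun d i => d.insert i 0) PySem.Dict.empty
  let email_dict : PySem.Dict String Int := id_list.foldl (fun d i => d.insert i 0) PySem.Dict.empty
  -- report = set(report)
  let rep : PySem.Set String := PySem.Set.ofList report
  -- for i in report: report_dict[i.split()[1]] += 1   (key present under Pre_)
  let report_dict := rep.foldl (fun d i =>
      d.insert ((PySem.Str.split₀ i).getD 1 "") (d.getD ((PySem.Str.split₀ i).getD 1 "") 0 + 1)) report_dict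
  -- for x,y in list(report_dict.items()): if y < k: del report_dict[x]
  let report_dict := report_dict.items.foldl (fun d p => if p.2 < k then d.erase p.1 else d) report_dict
  -- for s in report: if s.split()[1] in report_dict.keys(): email_dict[s.split()[0]] += 1
  let email_dict := rep.foldl (fun d s =>
      if report_dict.keys.contains ((PySem.Str.split₀ s).getD 1 "") then
        d.insert ((PySem.Str.split₀ s).getD 0 "") (d.getD ((PySem.Str.split₀ s).getD 0 "") 0 + 1)
      else d) email_dict
  email_dict.values

-- ===== PORT B =====
def solution_alt (id_list : List String) (report : List String) (k : Int) : List Int :=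
  -- reporters = {i: [] for i in id_list}
  let reporters : PySem.Dict String (List String) := id_list.foldl (fun d i => d.insert i []) PySem.Dict.empty
  -- for entry in set(report): t = entry.split(); reporters[t[1]].append(t[0])   (key present under Pre_)
  let reporters := (PySem.Set.ofList report).foldl (fun d entry =>
      let t := PySem.Str.split₀ entry
      d.modify (t.getD 1 "") [] (fun v => v ++ [t.getD 0 ""])) reporters
  -- emails = {i: 0 for i in id_list}
  let emails : PySem.Dict String Int := id_list.foldl (fun d i => d.insert i 0) PySem.Dict.empty
  -- for rs in reporters.values(): if len(rs) >= k: for who in rs: emails[who] += 1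
  let emails := reporters.values.foldl (fun d rs =>
      if k ≤ (rs.length : Int) then rs.foldl (fun d who => d.insert who (d.getD who 0 + 1)) d else d) emails
  emails.values

-- ===== PRECONDITION & SPEC =====
-- Pre_ is exactly where the Python A returns: every report entry splits into ≥ 2 words, its reported
-- id (word 1) is in id_list, and its reporter (word 0) is in id_list unless the reported id is
-- reported (as distinct strings) fewer than k times — otherwise A raises IndexError/KeyError.
def Pre_solution (id_list : List String) (report : List String) (k : Int) : Prop :=
  ∀ s ∈ report, 2 ≤ (PySem.Str.split₀ s).length ∧ (PySem.Str.split₀ s).getD 1 "" ∈ id_list ∧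
    ((PySem.Str.split₀ s).getD 0 "" ∈ id_list ∨
      (((PySem.List.dedup report).countP
          (fun s' => (PySem.Str.split₀ s').getD 1 "" == (PySem.Str.split₀ s).getD 1 "") : Int) < k))
instance (id_list : List String) (report : List String) (k : Int) : Decidable (Pre_solution id_list report k) := by unfold Pre_solution; infer_instance

def pvWitness_solution : List String × List String × Int :=
  (["muzi", "frodo", "apeach", "neo"], ["muzi frodo", "apeach frodo", "frodo neo", "muzi neo", "apeach muzi"], 2)

def Spec_solution (id_list : List String) (report : List String) (k : Int) (out : List Int) : Prop := out = solution_alt id_list report k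
instance (id_list : List String) (report : List String) (k : Int) (out : List Int) : Decidable (Spec_solution id_list report k out) := by unfold Spec_solution; infer_instance

-- ===== CLAIM (what is proved, stated in full; the proofs are below) =====
def Claim_equal_solution : Prop := ∀ (id_list : List String) (report : List String) (k : Int), Dom_solution id_list report k → Pre_solution id_list report k → Spec_solution id_list report k (solution id_list report k)


-- ===== LEMMAS AND PROOFS =====

/-- word 0 of a report entry (the reporter). -/
def whof (s : String) : String := (PySem.Str.split₀ s).getD 0 ""
/-- word 1 of a report entry (the reported id). -/
def whomf (s : String) : String := (PySem.Str.split₀ s).getD 1 ""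

lemma whomf_def (s : String) : (PySem.Str.split₀ s).getD 1 "" = whomf s := rfl
lemma whof_def (s : String) : (PySem.Str.split₀ s).getD 0 "" = whof s := rfl

/-- Seeding a dict with a constant value over a list: items are the deduped keys paired with it. -/
lemma seed_items {ν : Type} (v : ν) (l : List String) :
    (l.foldl (fun d i => d.insert i v) PySem.Dict.empty).items
      = (PySem.Set.ofList l).map (fun i => (i, v)) := by
  induction l using List.reverseRecOn with
  | nil => rfl
  | append_singleton xs x ih =>
    rw [List.foldl_append, List.foldl_cons, List.foldl_nil, PySem.Set.ofList_append_singleton,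
        PySem.Dict.items_insert]
    by_cases hx : x ∈ PySem.Set.ofList xs
    · have hc : ((List.foldl (fun d i => d.insert i v) PySem.Dict.empty xs).contains x) = true := by
        simp [PySem.Dict.contains, ih, List.any_map]
        exact (PySem.Set.mem_ofList _ _).mp hx
      rw [if_pos hc, ih, PySem.Set.add_eq_ite, if_pos hx, List.map_map]
      apply List.map_congr_left
      intro a ha
      by_cases h : a = x <;> simp [h]
    · have hc : ((List.foldl (fun d i => d.insert i v) PySem.Dict.empty xs).contains x) = false := by
        simp [PySem.Dict.contains, ih, List.any_map]
        intro a ha hax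
        exact hx ((PySem.Set.mem_ofList _ _).mpr (hax ▸ ha))
      rw [if_neg (by simp [hc]), ih, PySem.Set.add_eq_ite, if_neg hx]
      simp

lemma seed_keys {ν : Type} (v : ν) (l : List String) :
    (l.foldl (fun d i => d.insert i v) PySem.Dict.empty).keys = PySem.Set.ofList l := by
  simp [PySem.Dict.keys, seed_items, List.map_map, Function.comp_def]

lemma seed_getD {ν : Type} (v : ν) (l : List String) (x : String) :
    (l.foldl (fun d i => d.insert i v) PySem.Dict.empty).getD x v = v := by
  by_cases hx : x ∈ PySem.Set.ofList l
  · have : (x, v) ∈ (l.foldl (fun d i => d.insert i v) PySem.Dict.empty).items := by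
      rw [seed_items]; exact List.mem_map_of_mem hx
    have hnd : (l.foldl (fun d i => d.insert i v) PySem.Dict.empty).keys.Nodup := by
      rw [seed_keys]; exact PySem.Set.nodup_ofList l
    exact PySem.Dict.getD_of_mem_items _ this hnd v
  · apply PySem.Dict.getD_of_not_contains
    simp [PySem.Dict.contains, seed_items, List.any_map]
    intro a ha hax
    exact hx ((PySem.Set.mem_ofList _ _).mpr (hax ▸ ha))

/-- Updating a set with elements it already has leaves it unchanged. -/
lemma set_update_self (s : PySem.Set String) (xs : List String)
    (h : ∀ x ∈ xs, x ∈ s) : PySem.Set.update s xs = s := by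
  rw [PySem.Set.update_eq_append_filter]
  have : (PySem.Set.ofList xs).filter (fun y => !(PySem.Set.contains s y)) = [] := by
    rw [List.filter_eq_nil_iff]
    intro a ha
    simp
    exact h a ((PySem.Set.mem_ofList _ _).mp ha)
  rw [this, List.append_nil]

/-- The deletion pass: folding conditional erases filters the item list. -/
lemma erase_fold_items (k : Int) (l : List (String × Int)) (d : PySem.Dict String Int) :
    (l.foldl (fun d p => if p.2 < k then d.erase p.1 else d) d).items
      = d.items.filter (fun q => !(l.any (fun p => p.1 == q.1 && decide (p.2 < k)))) := by
  induction l generalizing d with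
  | nil => simp
  | cons p l ih =>
    rw [List.foldl_cons, ih]
    by_cases hp : p.2 < k
    · rw [if_pos hp]
      simp only [PySem.Dict.erase, List.filter_filter]
      apply List.filter_congr
      intro q hq
      simp [hp, List.any_cons, Bool.and_comm]
      rw [BEq.comm]
    · rw [if_neg hp]
      apply List.filter_congr
      intro q hq
      simp [hp, List.any_cons]

/-- Summing a one-point indicator over a nodup list containing the point. -/
lemma sum_map_indicator (ids : List String) (a : String) (hnd : ids.Nodup) (ha : a ∈ ids) (n : Int) :
    (ids.map (fun w => if a = w then n else 0)).sum = n := by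
  induction ids with
  | nil => cases ha
  | cons w ids ih =>
    rcases List.mem_cons.mp ha with h | h
    · subst h
      have : (ids.map (fun w => if a = w then n else 0)) = ids.map (fun _ => 0) := by
        apply List.map_congr_left
        intro b hb
        have : a ≠ b := fun e => (List.nodup_cons.mp hnd).1 (e ▸ hb)
        simp [this]
      simp [this]
    · have : w ≠ a := fun e => (List.nodup_cons.mp hnd).1 (e ▸ h)
      simp [Ne.symm this, ih (List.nodup_cons.mp hnd).2 h]

/-- Partitioning a count by a key function whose values all lie in a nodup list. -/
lemma countP_partition (l : List String) (keyf : String → String) (ids : List String)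
    (hnd : ids.Nodup) (hcov : ∀ s ∈ l, keyf s ∈ ids) (R : String → Bool) :
    (ids.map (fun w => (l.countP (fun s => keyf s == w && R s) : Int))).sum = (l.countP R : Int) := by
  induction l with
  | nil => simp
  | cons s l ih =>
    have hcov' : ∀ t ∈ l, keyf t ∈ ids := fun t ht => hcov t (List.mem_cons_of_mem _ ht)
    have hks : keyf s ∈ ids := hcov s List.mem_cons_self
    rw [List.countP_cons]
    by_cases hR : R s = true
    · have heach : ∀ w, ((s :: l).countP (fun t => keyf t == w && R t) : Int)
          = (l.countP (fun t => keyf t == w && R t) : Int) + (if keyf s = w then 1 else 0) := by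
        intro w
        rw [List.countP_cons]
        by_cases hw : keyf s = w <;> simp [hw, hR]
      calc (ids.map (fun w => ((s :: l).countP (fun t => keyf t == w && R t) : Int))).sum
          = (ids.map (fun w => (l.countP (fun t => keyf t == w && R t) : Int)
              + (if keyf s = w then 1 else 0))).sum := by
            apply congrArg; exact List.map_congr_left (fun w _ => heach w)
        _ = (ids.map (fun w => (l.countP (fun t => keyf t == w && R t) : Int))).sum
              + (ids.map (fun w => if keyf s = w then (1:Int) else 0)).sum := by
            rw [← List.sum_map_add]
        _ = (l.countP R : Int) + 1 := by
            rw [ih hcov', sum_map_indicator ids (keyf s) hnd hks 1]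
        _ = ((l.countP R + if R s then 1 else 0 : Nat) : Int) := by
            simp [hR]
    · have hR' : R s = false := by simpa using hR
      have heach : ∀ w, ((s :: l).countP (fun t => keyf t == w && R t))
          = (l.countP (fun t => keyf t == w && R t)) := by
        intro w; rw [List.countP_cons]; simp [hR']
      simp only [heach, hR']
      rw [ih hcov']
      simp

/-- B's e-mail pass, value at x: adds, per qualifying group, its count of x. -/
lemma emails_getD (k : Int) (vs : List (List String)) (d : PySem.Dict String Int) (x : String) :
    ((vs.foldl (fun d rs => if k ≤ (rs.length : Int) then
        rs.foldl (fun d who => d.insert who (d.getD who 0 + 1)) d else d) d)).getD x 0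
      = d.getD x 0 + (vs.map (fun rs => if k ≤ (rs.length : Int) then (rs.count x : Int) else 0)).sum := by
  induction vs generalizing d with
  | nil => simp
  | cons rs vs ih =>
    rw [List.foldl_cons, List.map_cons, List.sum_cons, ih]
    by_cases h : k ≤ (rs.length : Int)
    · rw [if_pos h, if_pos h, PySem.Dict.getD_foldl_insert_add_one]
      ring
    · rw [if_neg h, if_neg h]
      ring

/-- B's e-mail pass keeps the key list unchanged when every inserted key is present. -/
lemma emails_keys (k : Int) (vs : List (List String)) (d : PySem.Dict String Int)
    (h : ∀ rs ∈ vs, k ≤ (rs.length : Int) → ∀ y ∈ rs, y ∈ d.keys) :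
    ((vs.foldl (fun d rs => if k ≤ (rs.length : Int) then
        rs.foldl (fun d who => d.insert who (d.getD who 0 + 1)) d else d) d)).keys = d.keys := by
  induction vs generalizing d with
  | nil => rfl
  | cons rs vs ih =>
    rw [List.foldl_cons]
    by_cases hc : k ≤ (rs.length : Int)
    · rw [if_pos hc]
      have hk : (rs.foldl (fun d who => d.insert who (d.getD who 0 + 1)) d).keys = d.keys := by
        rw [PySem.Dict.keys_foldl_insert]
        exact set_update_self d.keys rs (h rs List.mem_cons_self hc)
      rw [ih _ ?_, hk]
      intro rs' hrs' hlen y hy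
      rw [hk]
      exact h rs' (List.mem_cons_of_mem _ hrs') hlen y hy
    · rw [if_neg hc]
      exact ih _ (fun rs' hrs' => h rs' (List.mem_cons_of_mem _ hrs'))

/-- A's first pass keyed by the reported id, value at w. -/
lemma cnt_getD (r : List String) (d : PySem.Dict String Int) (w : String) :
    (r.foldl (fun d s => d.insert (whomf s) (d.getD (whomf s) 0 + 1)) d).getD w 0
      = d.getD w 0 + (List.count w (r.map whomf) : Int) := by
  have h := PySem.Dict.getD_foldl_insert_add_one (r.map whomf) d w
  rw [List.foldl_map] at h
  simpa using h

/-- A's e-mail pass keyed by the reporter, value at x. -/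
lemma ed_getD (l : List String) (d : PySem.Dict String Int) (x : String) :
    (l.foldl (fun d s => d.insert (whof s) (d.getD (whof s) 0 + 1)) d).getD x 0
      = d.getD x 0 + (List.count x (l.map whof) : Int) := by
  have h := PySem.Dict.getD_foldl_insert_add_one (l.map whof) d x
  rw [List.foldl_map] at h
  simpa using h

/-- B's grouping pass, value at w. -/
lemma grp_getD (r : List String) (d : PySem.Dict String (List String)) (w : String) :
    (r.foldl (fun d s => d.modify (whomf s) [] (fun v => v ++ [whof s])) d).getD w []
      = d.getD w [] ++ (r.filter (fun s => whomf s == w)).map whof := by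
  have h := PySem.Dict.getD_foldl_modify_append (r.map (fun s => (whomf s, whof s))) d w
  rw [List.foldl_map] at h
  simpa [List.filter_map, Function.comp_def] using h

/-- count over a mapped list as a countP. -/
lemma count_map_eq_countP (l : List String) (f : String → String) (a : String) :
    List.count a (l.map f) = l.countP (fun s => f s == a) := by
  rw [List.count_eq_countP, List.countP_map]; rfl

-- ===== VERDICT (by name: the statement is the Claim_ definition above) =====
theorem solution_spec : Claim_equal_solution := by
  intro id_list report k hdom hpre
  clear hdom
  unfold Spec_solution
  simp only [Pre_solution, PySem.List.dedup_eq_ofList, whomf_def, whof_def] at hpre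
  simp only [solution, solution_alt, whomf_def, whof_def]
  set r := PySem.Set.ofList report with hr
  set ids := PySem.Set.ofList id_list with hids
  have hmemr : ∀ s ∈ r, s ∈ report := fun s hs => (PySem.Set.mem_ofList report s).mp hs
  have hwmr : ∀ s ∈ r, whomf s ∈ id_list := fun s hs => (hpre s (hmemr s hs)).2.1
  have hwmr' : ∀ s ∈ r, whomf s ∈ ids := fun s hs =>
    (PySem.Set.mem_ofList id_list _).mpr (hwmr s hs)
  have hidsnd : ids.Nodup := PySem.Set.nodup_ofList id_list
  have hcntP : ∀ w, List.count w (r.map whomf) = r.countP (fun s => whomf s == w) :=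
    fun w => count_map_eq_countP r whomf w
  have hdisj : ∀ s ∈ r, whof s ∈ id_list ∨
      ((r.countP (fun s' => whomf s' == whomf s) : Int)) < k :=
    fun s hs => (hpre s (hmemr s hs)).2.2
  set d0 : PySem.Dict String Int := id_list.foldl (fun d i => d.insert i 0) PySem.Dict.empty with hd0
  set rd := r.foldl (fun d i => d.insert (whomf i) (d.getD (whomf i) 0 + 1)) d0 with hrd
  set rd2 := rd.items.foldl (fun d p => if p.2 < k then d.erase p.1 else d) rd with hrd2
  have hrdkeys : rd.keys = ids := by
    rw [hrd, PySem.Dict.keys_foldl_insert_key r whomf (fun d i => d.getD (whomf i) 0 + 1) d0,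
        hd0, seed_keys, ← hids]
    exact set_update_self ids (r.map whomf) (by
      intro x hx
      obtain ⟨s, hs, rfl⟩ := List.mem_map.mp hx
      exact hwmr' s hs)
  have hrdnodup : rd.keys.Nodup := by rw [hrdkeys]; exact hidsnd
  have hrdgetD : ∀ w, rd.getD w 0 = (List.count w (r.map whomf) : Int) := by
    intro w
    rw [hrd, cnt_getD, hd0, seed_getD]
    ring
  have hrditems : rd.items = ids.map (fun w => (w, (List.count w (r.map whomf) : Int))) := by
    rw [PySem.Dict.items_eq_map_keys rd hrdnodup 0, hrdkeys]
    exact List.map_congr_left (fun w _ => by rw [hrdgetD])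
  have hrd2items : rd2.items
      = (ids.filter (fun w => !decide ((List.count w (r.map whomf) : Int) < k))).map
          (fun w => (w, (List.count w (r.map whomf) : Int))) := by
    rw [hrd2, erase_fold_items, hrditems, List.filter_map]
    apply congrArg
    apply List.filter_congr
    intro w hw
    simp only [Function.comp_apply, List.any_map]
    apply congrArg
    by_cases hlt : (List.count w (r.map whomf) : Int) < k
    · simp only [hlt, decide_true]
      apply List.any_eq_true.mpr
      exact ⟨w, hw, by simp [hlt]⟩
    · simp only [hlt, decide_false]
      apply List.any_eq_false.mpr
      intro w' hw'
      simp only [Function.comp_apply, Bool.and_eq_true, beq_iff_eq, decide_eq_true_eq, not_and]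
      intro he
      rw [he]
      exact hlt
  have hrd2keys : rd2.keys
      = ids.filter (fun w => !decide ((List.count w (r.map whomf) : Int) < k)) := by
    simp [PySem.Dict.keys, hrd2items, List.map_map, Function.comp_def]
  have hcond : ∀ s ∈ r, (rd2.keys.contains (whomf s))
      = decide (k ≤ (List.count (whomf s) (r.map whomf) : Int)) := by
    intro s hs
    rw [hrd2keys]
    by_cases hk : k ≤ (List.count (whomf s) (r.map whomf) : Int)
    · simp only [hk, decide_true]
      apply List.contains_iff_mem.mpr
      apply List.mem_filter.mpr
      exact ⟨hwmr' s hs, by rw [Bool.not_eq_true', decide_eq_false_iff_not]; omega⟩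
    · simp only [hk, decide_false]
      rw [← Bool.not_eq_true]
      intro hc
      have h2 := (List.mem_filter.mp (List.contains_iff_mem.mp hc)).2
      rw [Bool.not_eq_true', decide_eq_false_iff_not] at h2
      omega
  -- ----- A side: turn the conditional e-mail fold into a fold over the filtered set -----
  rw [← List.foldl_filter, List.filter_congr hcond]
  set l1 := r.filter (fun s => decide (k ≤ (List.count (whomf s) (r.map whomf) : Int))) with hl1
  have hl1whof : ∀ s ∈ l1, whof s ∈ id_list := by
    intro s hs
    have hm := List.mem_filter.mp hs
    have hk : k ≤ (List.count (whomf s) (r.map whomf) : Int) := by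
      have := hm.2; simpa using this
    rcases hdisj s hm.1 with h | h
    · exact h
    · rw [hcntP (whomf s)] at hk; omega
  have hedkeys : (l1.foldl (fun d s => d.insert (whof s) (d.getD (whof s) 0 + 1)) d0).keys = ids := by
    rw [PySem.Dict.keys_foldl_insert_key l1 whof (fun d s => d.getD (whof s) 0 + 1) d0,
        hd0, seed_keys, ← hids]
    exact set_update_self ids (l1.map whof) (by
      intro x hx
      obtain ⟨s, hs, rfl⟩ := List.mem_map.mp hx
      exact (PySem.Set.mem_ofList id_list _).mpr (hl1whof s hs))
  have hednodup : (l1.foldl (fun d s => d.insert (whof s) (d.getD (whof s) 0 + 1)) d0).keys.Nodup := by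
    rw [hedkeys]; exact hidsnd
  rw [PySem.Dict.values_eq_map_keys _ hednodup 0, hedkeys]
  -- ----- B side: the grouping dict -----
  set e0 : PySem.Dict String (List String) := id_list.foldl (fun d i => d.insert i []) PySem.Dict.empty with he0
  set rp := r.foldl (fun d entry => d.modify (whomf entry) [] fun v => v ++ [whof entry]) e0 with hrp
  have hrpkeys : rp.keys = ids := by
    rw [hrp, PySem.Dict.keys_foldl_modify_key r whomf [] (fun d entry => fun v => v ++ [whof entry]) e0,
        he0, seed_keys, ← hids]
    exact set_update_self ids (r.map whomf) (by
      intro x hx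
      obtain ⟨s, hs, rfl⟩ := List.mem_map.mp hx
      exact hwmr' s hs)
  have hrpnodup : rp.keys.Nodup := by rw [hrpkeys]; exact hidsnd
  have hrpgetD : ∀ w, rp.getD w [] = (r.filter (fun s => whomf s == w)).map whof := by
    intro w
    rw [hrp, grp_getD, he0, seed_getD, List.nil_append]
  have hrpvalues : rp.values = ids.map (fun w => (r.filter (fun s => whomf s == w)).map whof) := by
    rw [PySem.Dict.values_eq_map_keys rp hrpnodup [], hrpkeys]
    exact List.map_congr_left (fun w _ => hrpgetD w)
  rw [hrpvalues]
  -- ----- B side: the e-mail tally over the groups -----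
  have hgrpmem : ∀ rs ∈ ids.map (fun w => (r.filter (fun s => whomf s == w)).map whof),
      k ≤ (rs.length : Int) → ∀ y ∈ rs, y ∈ d0.keys := by
    intro rs hrs hklen y hy
    obtain ⟨w, hw, rfl⟩ := List.mem_map.mp hrs
    obtain ⟨s, hs, rfl⟩ := List.mem_map.mp hy
    have hm := List.mem_filter.mp hs
    have hsw : whomf s = w := by simpa using hm.2
    rw [hd0, seed_keys, ← hids]
    have hlen : ((r.filter (fun s => whomf s == w)).map whof).length
        = r.countP (fun s => whomf s == w) := by
      rw [List.length_map, ← List.countP_eq_length_filter]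
    rcases hdisj s hm.1 with h | h
    · exact (PySem.Set.mem_ofList id_list _).mpr h
    · exfalso
      rw [hlen] at hklen
      rw [hsw] at h
      omega
  have hemkeys := emails_keys k (ids.map (fun w => (r.filter (fun s => whomf s == w)).map whof)) d0 hgrpmem
  have hemnodup : ((ids.map (fun w => (r.filter (fun s => whomf s == w)).map whof)).foldl
      (fun d rs => if k ≤ (rs.length : Int) then
        rs.foldl (fun d who => d.insert who (d.getD who 0 + 1)) d else d) d0).keys.Nodup := by
    rw [hemkeys, hd0, seed_keys]; exact PySem.Set.nodup_ofList id_list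
  rw [PySem.Dict.values_eq_map_keys _ hemnodup 0, hemkeys, hd0, seed_keys, ← hids]
  -- ----- pointwise equality of the two value lists -----
  apply List.map_congr_left
  intro x hx
  rw [ed_getD, emails_getD, seed_getD, List.map_map]
  rw [count_map_eq_countP, hl1, List.countP_filter]
  simp only [hcntP]
  rw [← countP_partition r whomf ids hidsnd (fun s hs => hwmr' s hs)
        (fun s => (whof s == x) && decide (k ≤ (r.countP (fun s' => whomf s' == whomf s) : Int)))]
  apply congrArg (fun t => 0 + t)
  apply congrArg List.sum
  apply List.map_congr_left
  intro w hw
  simp only [Function.comp_apply]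
  rw [count_map_eq_countP, List.countP_filter, List.length_map, ← List.countP_eq_length_filter]
  by_cases hPw : k ≤ (r.countP (fun s' => whomf s' == w) : Int)
  · rw [if_pos hPw]
    apply congrArg Nat.cast
    apply List.countP_congr
    intro s hs
    by_cases hsw : whomf s = w
    · simp [hsw, hPw, Bool.and_comm]
    · simp [hsw]
  · rw [if_neg hPw]
    have hz : (r.countP (fun s => whomf s == w
        && (whof s == x && decide (k ≤ (r.countP (fun s' => whomf s' == whomf s) : Int))))) = 0 := by
      apply List.countP_eq_zero.mpr
      intro s hs
      simp only [Bool.and_eq_true, beq_iff_eq, decide_eq_true_eq, not_and]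
      intro hsw hbx
      rw [hsw]
      exact hPw
    rw [hz]
    simp
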